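-- pv_equiv track=rewrite | github.com/joominchul/codingTestJoo | Lv.2 귤 고르기.py | solution
-- ===== SOURCE A (Python) =====
-- def solution(k, tangerine):
--     answer = 0
--     #크기별 귤을 저장할 딕셔너리
--     guul = {}
--     for t in tangerine:
--         temp = guul.get(t)
--         if(temp):
--             guul[t] += 1
--         else:
--             guul[t] = 1
--     #각 타입 별 귤의 개수를 저장할 리스트
--     t_list = []
--     for g in guul:
--         t_list.append(guul[g])
--     #귤 개수가 많은 것부터 상자에 담기귤 개수가 많은 것부터 상자에 담기
--     t_list = sorted(t_list)
--     for i in range(len(t_list) - 1, -1, -1):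
--         if(k > 0):
--             answer += 1
--             k -= t_list[i]
--         else:
--             break
--     return answer
-- ===== SOURCE B (Python) =====
-- from collections import Counter
-- from itertools import accumulate
-- from bisect import bisect_left
--
-- def solution(k, tangerine):
--     if k <= 0:
--         return 0
--     counts = sorted(Counter(tangerine).values(), reverse=True)
--     cums = list(accumulate(counts))
--     i = bisect_left(cums, k)
--     return i + 1 if i < len(cums) else len(cums)
-- ===== Notes on version B (the rewrite author's own statement) =====
-- stated objective: alternative
-- what changed: Replaces A's hand-rolled dict-building, ascending sort and backwards break-loop that mutates k with Counter + descending sort + itertools.accumulate prefix sums + a bisect_left binary search for the first prefix reaching k.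
import Mathlib
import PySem

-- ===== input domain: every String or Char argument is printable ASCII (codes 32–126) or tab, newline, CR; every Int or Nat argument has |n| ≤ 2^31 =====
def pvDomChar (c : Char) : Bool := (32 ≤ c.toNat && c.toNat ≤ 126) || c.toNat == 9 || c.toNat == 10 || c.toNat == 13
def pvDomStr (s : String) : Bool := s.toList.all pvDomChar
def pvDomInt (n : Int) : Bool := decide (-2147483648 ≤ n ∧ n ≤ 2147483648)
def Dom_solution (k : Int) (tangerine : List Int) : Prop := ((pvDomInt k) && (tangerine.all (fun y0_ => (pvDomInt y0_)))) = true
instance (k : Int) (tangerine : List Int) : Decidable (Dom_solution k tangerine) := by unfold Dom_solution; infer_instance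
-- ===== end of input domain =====

-- B replaces A's hand-rolled dict building, ascending sort and backwards break-loop by
-- Counter + descending sort + accumulate prefix sums + bisect_left (objective: alternative).

-- ===== PORT A =====
-- 'for i in range(len(t_list)-1, -1, -1): if k > 0: answer += 1; k -= t_list[i] else: break'
-- (pyGetD's default 0 is unreachable: every index produced by the range is in bounds)
def solLoopA (s : List Int) : List Int → Int → Int → Int
  | [], answer, _ => answer
  | i :: rest, answer, k =>
    if k > 0 then solLoopA s rest (answer + 1) (k - PySem.List.pyGetD s i 0) else answer

def solution (k : Int) (tangerine : List Int) : Int :=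
  -- guul = {}; for t in tangerine: temp = guul.get(t); if temp: guul[t] += 1 else: guul[t] = 1
  let guul : PySem.Dict Int Int := tangerine.foldl (fun d t =>
    match d.get? t with
    | some temp => if temp ≠ 0 then d.insert t (temp + 1) else d.insert t 1
    | none => d.insert t 1) PySem.Dict.empty
  -- t_list = []; for g in guul: t_list.append(guul[g])   (guul[g] cannot miss: g is a key)
  let tList : List Int := guul.keys.foldl (fun l g => l ++ [guul.getD g 0]) []
  let tList := PySem.List.sorted tList (fun x => x) false
  solLoopA tList (PySem.List.pyRange ((tList.length : Int) - 1) (-1) (-1)) 0 k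

-- ===== PORT B =====
-- list(accumulate(xs)) : running prefix sums
def pyAccum : Int → List Int → List Int
  | _, [] => []
  | acc, x :: xs => (acc + x) :: pyAccum (acc + x) xs

def solution_alt (k : Int) (tangerine : List Int) : Int :=
  if k ≤ 0 then 0
  else
    let counts := PySem.List.sorted (PySem.Dict.counter tangerine).values (fun x => x) true
    let cums := pyAccum 0 counts
    let i := PySem.List.bisectLeft cums k
    if i < cums.length then (i : Int) + 1 else (cums.length : Int)

-- ===== PRECONDITION & SPEC =====
def Spec_solution (k : Int) (tangerine : List Int) (out : Int) : Prop := out = solution_alt k tangerine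
instance (k : Int) (tangerine : List Int) (out : Int) : Decidable (Spec_solution k tangerine out) := by unfold Spec_solution; infer_instance

-- ===== CLAIM (what is proved, stated in full; the proofs are below) =====
def Claim_equal_solution : Prop := ∀ (k : Int) (tangerine : List Int), Dom_solution k tangerine → Spec_solution k tangerine (solution k tangerine)

-- ===== LEMMAS AND PROOFS =====

-- number of boxes taken when consuming counts front-to-back
def fBox : List Int → Int → Int
  | [], _ => 0
  | c :: r, k => if k > 0 then 1 + fBox r (k - c) else 0

-- first index whose element is ≥ k (linear characterisation of bisect_left)
def idxF : List Int → Int → Nat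
  | [], _ => 0
  | c :: t, k => if k ≤ c then 0 else idxF t k + 1

theorem fBox_nonpos (r : List Int) (k : Int) (h : ¬ k > 0) : fBox r k = 0 := by
  cases r with
  | nil => rfl
  | cons c t => simp [fBox, h]

theorem solLoopA_eq_fBox (s : List Int) (idxs : List Int) (ans k : Int) :
    solLoopA s idxs ans k = ans + fBox (idxs.map (fun i => PySem.List.pyGetD s i 0)) k := by
  induction idxs generalizing ans k with
  | nil => simp [solLoopA, fBox]
  | cons i rest ih =>
    simp only [solLoopA, List.map_cons, fBox]
    by_cases h : k > 0
    · rw [if_pos h, if_pos h, ih]; ring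
    · simp [h]

theorem pyRange_desc_map (s : List Int) :
    (PySem.List.pyRange ((s.length : Int) - 1) (-1) (-1)).map (fun i => PySem.List.pyGetD s i 0)
      = s.reverse := by
  have hr : PySem.List.pyRange ((s.length : Int) - 1) (-1) (-1)
      = (List.range s.length).map (fun (j : Nat) => (s.length : Int) - 1 - (j : Int)) := by
    simp only [PySem.List.pyRange]
    rcases Nat.eq_zero_or_pos s.length with h | h
    · simp [h]
    · have h1 : ¬ ((0 : Int) < -1) := by decide
      have h2 : (-1 : Int) < (s.length : Int) - 1 := by omega
      rw [if_neg (by decide), if_neg h1, if_pos h2]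
      have : ((s.length : Int) - 1 - -1 + - -1 - 1) / -(-1) = (s.length : Int) := by
        norm_num
      rw [this]
      rw [Int.toNat_natCast]
      apply List.map_congr_left
      intro j _
      ring
  rw [hr, List.map_map]
  apply List.ext_getElem
  · simp
  · intro n h1 h2
    simp only [List.getElem_map, List.getElem_range, Function.comp_apply, List.getElem_reverse]
    simp only [List.length_map, List.length_range] at h1
    rw [PySem.List.pyGetD_eq_getElem s 0 (by omega) (by omega)]
    congr 1
    omega

-- A's counting loop builds exactly Counter(tangerine)
theorem foldA_eq_counter_aux (l : List Int) (d : PySem.Dict Int Int)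
    (hpos : ∀ t v, d.get? t = some v → 1 ≤ v) :
    l.foldl (fun d t =>
      match d.get? t with
      | some temp => if temp ≠ 0 then d.insert t (temp + 1) else d.insert t 1
      | none => d.insert t 1) d
    = l.foldl (fun d x => d.modify x 0 (· + 1)) d := by
  induction l generalizing d with
  | nil => rfl
  | cons t rest ih =>
    simp only [List.foldl_cons]
    have hstep : (match d.get? t with
        | some temp => if temp ≠ 0 then d.insert t (temp + 1) else d.insert t 1
        | none => d.insert t 1) = d.modify t 0 (· + 1) := by
      simp only [PySem.Dict.modify, PySem.Dict.getD]
      cases hg : d.get? t with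
      | none => simp
      | some v =>
        have hv : 1 ≤ v := hpos t v hg
        simp [show v ≠ 0 by omega]
    rw [hstep]
    apply ih
    intro t' v' hg'
    by_cases he : t' = t
    · subst he
      rw [PySem.Dict.modify, PySem.Dict.get?_insert_self, Option.some.injEq] at hg'
      subst hg'
      simp only [PySem.Dict.getD]
      cases hg : d.get? t' with
      | none => simp
      | some v => have := hpos t' v hg; simp; omega
    · rw [PySem.Dict.modify, PySem.Dict.get?_insert_of_ne _ _ (by simpa using he)] at hg'
      exact hpos t' v' hg'

-- A's t_list is the counter's values list
theorem tList_eq_values (tangerine : List Int) :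
    (PySem.Dict.counter tangerine).keys.foldl
        (fun l g => l ++ [(PySem.Dict.counter tangerine).getD g 0]) []
      = (PySem.Dict.counter tangerine).values := by
  rw [PySem.List.foldl_append_singleton_eq_map]
  simp only [List.nil_append]
  rw [PySem.Dict.values, PySem.Dict.items_counter, List.map_map]
  rw [PySem.Dict.keys_counter]
  apply List.map_congr_left
  intro g _
  simp [PySem.Dict.getD_counter]

-- descending sort is the reverse of the ascending sort (Int values, identity key)
theorem sorted_true_eq_reverse (xs : List Int) :
    PySem.List.sorted xs (fun x => x) true = (PySem.List.sorted xs (fun x => x) false).reverse := by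
  apply List.Perm.eq_of_pairwise (le := fun a b => b ≤ a)
  · intro a b _ _ h1 h2; omega
  · exact PySem.List.sorted_pairwise_rev xs (fun x => x)
  · rw [List.pairwise_reverse]
    exact PySem.List.sorted_pairwise xs (fun x => x)
  · exact (PySem.List.sorted_perm xs (fun x => x) true).trans
      ((PySem.List.sorted_perm xs (fun x => x) false).symm.trans
        (List.reverse_perm _).symm)

theorem pyAccum_shift (r : List Int) (a b : Int) :
    pyAccum (a + b) r = (pyAccum b r).map (a + ·) := by
  induction r generalizing b with
  | nil => rfl
  | cons x xs ih =>
    simp only [pyAccum, List.map_cons, List.cons.injEq]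
    exact ⟨by ring, by rw [show a + b + x = a + (b + x) by ring, ih]⟩

theorem pyAccum_length (a : Int) (r : List Int) : (pyAccum a r).length = r.length := by
  induction r generalizing a with
  | nil => rfl
  | cons x xs ih => simp [pyAccum, ih]

theorem idxF_map_shift (l : List Int) (c k : Int) :
    idxF (l.map (c + ·)) k = idxF l (k - c) := by
  induction l with
  | nil => rfl
  | cons y t ih =>
    simp only [List.map_cons, idxF, ih]
    congr 1
    simp only [eq_iff_iff]
    omega

theorem idxF_le_length (l : List Int) (k : Int) : idxF l k ≤ l.length := by
  induction l with
  | nil => simp [idxF]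
  | cons c t ih =>
    simp only [idxF, List.length_cons]
    split_ifs with h
    · omega
    · omega

theorem fBox_eq_idx (r : List Int) (k : Int) (hk : k > 0) :
    fBox r k = if idxF (pyAccum 0 r) k < r.length then (idxF (pyAccum 0 r) k : Int) + 1
               else (r.length : Int) := by
  induction r generalizing k with
  | nil => simp [fBox, idxF, pyAccum]
  | cons c r' ih =>
    simp only [fBox, if_pos hk]
    have hacc : pyAccum 0 (c :: r') = c :: (pyAccum 0 r').map (c + ·) := by
      have h := pyAccum_shift r' c 0
      rw [add_zero] at h
      simp [pyAccum, h]
    rw [hacc]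
    simp only [idxF, List.length_cons]
    by_cases hc : k ≤ c
    · rw [if_pos hc, fBox_nonpos r' (k - c) (by omega)]
      rw [if_pos (by omega)]
      norm_num
    · rw [if_neg hc, idxF_map_shift]
      have hkc : k - c > 0 := by omega
      rw [ih (k - c) hkc]
      have hle := idxF_le_length (pyAccum 0 r') (k - c)
      rw [pyAccum_length] at hle
      by_cases hlt : idxF (pyAccum 0 r') (k - c) < r'.length
      · rw [if_pos hlt, if_pos (by omega)]
        push_cast; ring
      · rw [if_neg hlt, if_neg (by omega)]
        push_cast; ring

theorem idxF_lt_spec (l : List Int) (k : Int) (j : Nat) (hj : j < l.length)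
    (h : j < idxF l k) : l[j] < k := by
  induction l generalizing j with
  | nil => simp at hj
  | cons c t ih =>
    simp only [idxF] at h
    split_ifs at h with hc
    · omega
    · cases j with
      | zero => simpa using (by omega : ¬ k ≤ c)
      | succ j' =>
        simp only [List.getElem_cons_succ]
        exact ih j' (by simpa using hj) (by omega)

theorem idxF_ge_spec (l : List Int) (k : Int) (hp : l.Pairwise (· ≤ ·)) (j : Nat)
    (hj : j < l.length) (h : idxF l k ≤ j) : k ≤ l[j] := by
  induction l generalizing j with
  | nil => simp at hj
  | cons c t ih =>
    rw [List.pairwise_cons] at hp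
    simp only [idxF] at h
    split_ifs at h with hc
    · cases j with
      | zero => simpa using hc
      | succ j' =>
        have hj' : j' < t.length := by simpa using hj
        simp only [List.getElem_cons_succ]
        exact le_trans hc (hp.1 _ (List.getElem_mem hj'))
    · cases j with
      | zero => omega
      | succ j' =>
        simp only [List.getElem_cons_succ]
        exact ih hp.2 j' (by simpa using hj) (by omega)

theorem bisectLeft_eq_idxF (l : List Int) (k : Int) (hp : l.Pairwise (· ≤ ·)) :
    PySem.List.bisectLeft l k = idxF l k := by
  obtain ⟨hble, hblt, hbge⟩ := PySem.List.bisectLeft_spec l k hp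
  have hile := idxF_le_length l k
  by_contra hne
  rcases Nat.lt_or_ge (PySem.List.bisectLeft l k) (idxF l k) with h | h
  · have hjlt : PySem.List.bisectLeft l k < l.length := by omega
    have h1 := idxF_lt_spec l k _ hjlt h
    have h2 := hbge _ hjlt (le_refl _)
    omega
  · have h' : idxF l k < PySem.List.bisectLeft l k := by omega
    have hjlt : idxF l k < l.length := by omega
    have h1 := hblt _ hjlt h'
    have h2 := idxF_ge_spec l k hp _ hjlt (le_refl _)
    omega

theorem le_pyAccum (r : List Int) (hr : ∀ x ∈ r, 0 ≤ x) (a : Int) :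
    ∀ y ∈ pyAccum a r, a ≤ y := by
  induction r generalizing a with
  | nil => simp [pyAccum]
  | cons x xs ih =>
    intro y hy
    have hx : 0 ≤ x := hr x (by simp)
    simp only [pyAccum, List.mem_cons] at hy
    rcases hy with h | h
    · omega
    · have := ih (fun z hz => hr z (by simp [hz])) (a + x) y h
      omega

theorem pyAccum_pairwise (r : List Int) (hr : ∀ x ∈ r, 0 ≤ x) (a : Int) :
    (pyAccum a r).Pairwise (· ≤ ·) := by
  induction r generalizing a with
  | nil => simp [pyAccum]
  | cons x xs ih =>
    simp only [pyAccum, List.pairwise_cons]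
    refine ⟨fun y hy => ?_, ih (fun z hz => hr z (by simp [hz])) (a + x)⟩
    have hx : 0 ≤ x := hr x (by simp)
    have := le_pyAccum xs (fun z hz => hr z (by simp [hz])) (a + x) y hy
    omega

theorem counter_values_pos (tangerine : List Int) :
    ∀ x ∈ (PySem.Dict.counter tangerine).values, 1 ≤ x := by
  intro x hx
  rw [PySem.Dict.values, PySem.Dict.items_counter, List.map_map] at hx
  obtain ⟨g, hg, hgx⟩ := List.mem_map.mp hx
  rw [PySem.Set.mem_ofList] at hg
  simp only [Function.comp_apply] at hgx
  have : 1 ≤ List.count g tangerine := List.count_pos_iff.mpr hg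
  omega

-- ===== VERDICT (by name: the statement is the Claim_ definition above) =====
theorem solution_spec : Claim_equal_solution := by
  intro k tangerine _
  unfold Spec_solution solution solution_alt
  simp only
  rw [foldA_eq_counter_aux tangerine PySem.Dict.empty
    (by intro t v h; rw [PySem.Dict.get?_empty] at h; exact absurd h (by simp))]
  rw [show (tangerine.foldl (fun d x => d.modify x 0 (· + 1)) PySem.Dict.empty)
      = PySem.Dict.counter tangerine from rfl]
  rw [tList_eq_values]
  rw [solLoopA_eq_fBox, pyRange_desc_map, zero_add]
  rw [← sorted_true_eq_reverse]
  set counts := PySem.List.sorted (PySem.Dict.counter tangerine).values (fun x => x) true with hc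
  have hpos : ∀ x ∈ counts, 1 ≤ x := by
    intro x hx
    rw [hc, PySem.List.mem_sorted] at hx
    exact counter_values_pos tangerine x hx
  by_cases hk : k ≤ 0
  · rw [fBox_nonpos counts k (by omega), if_pos hk]
  · rw [if_neg hk]
    rw [fBox_eq_idx counts k (by omega)]
    rw [bisectLeft_eq_idxF _ k (pyAccum_pairwise counts (fun x hx => by have := hpos x hx; omega) 0)]
    rw [pyAccum_length]
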